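-- pv_equiv track=rewrite | github.com/TikSL/Advent-of-Code | 2023/solutions/09.py | trouver_precedent
-- ===== SOURCE A (Python) =====
-- def contient_unique_elt(liste):
--     return len(set(liste)) == 1
--
-- def calculer_diff(liste:list):
--     while not contient_unique_elt(liste[-1]):
--         differences = []
--         for i in range(1, len(liste[-1])):
--             differences.append(liste[-1][i] - liste[-1][i-1])
--         liste.append(differences)
--     return liste
--
-- def trouver_precedent(sequence):
--     sequence = calculer_diff(sequence)
--     n = len(sequence)
--     i = n-2
--     while i >=0:
--         sequence[i] = [sequence[i][0] - sequence[i+1][0]] + sequence[i]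
--         i-=1
--     return sequence
-- ===== SOURCE B (Python) =====
-- # Recursive decomposition: build the difference table by recursion on the last
-- # row, then back-fill extrapolated previous values by recursion on the rows.
-- # Mutates `sequence` in place (like A) via slice assignment; equivalence is
-- # about the return value.
-- def trouver_precedent(sequence):
--     def expand(row):
--         if len(set(row)) == 1:
--             return [row]
--         return [row] + expand([b - a for a, b in zip(row, row[1:])])
--
--     def backfill(rows):
--         if len(rows) == 1:
--             return rows
--         sub = backfill(rows[1:])
--         return [[rows[0][0] - sub[0][0]] + rows[0]] + sub
--
--     sequence[:] = backfill(sequence[:-1] + expand(sequence[-1]))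
--     return sequence
-- ===== Notes on version B (the rewrite author's own statement) =====
-- stated objective: simpler
-- what changed: Replaces the two imperative while-loops with index arithmetic and in-place assignment by two small recursions: expand(row) recursively builds the difference rows and backfill(rows) recursively prepends each row's extrapolated previous value using the already-backfilled tail, so no indices are manipulated at all.
import Mathlib
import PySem

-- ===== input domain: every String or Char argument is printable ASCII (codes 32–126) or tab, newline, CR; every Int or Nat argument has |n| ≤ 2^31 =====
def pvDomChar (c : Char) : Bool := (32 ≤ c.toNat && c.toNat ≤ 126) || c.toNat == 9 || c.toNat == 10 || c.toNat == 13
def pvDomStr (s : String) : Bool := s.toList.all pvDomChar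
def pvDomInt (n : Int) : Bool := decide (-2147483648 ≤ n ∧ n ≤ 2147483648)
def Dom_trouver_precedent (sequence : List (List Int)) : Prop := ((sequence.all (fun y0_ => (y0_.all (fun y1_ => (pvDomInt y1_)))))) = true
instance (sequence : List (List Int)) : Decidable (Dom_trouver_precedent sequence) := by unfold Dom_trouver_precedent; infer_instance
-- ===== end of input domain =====

-- B replaces A's two index-juggling while-loops by two small recursions (expand the
-- difference table, then backfill extrapolated values front-to-back); same return value.
-- Both Pythons mutate `sequence` in place the same way; the equivalence proved here is
-- about the return value.

-- ===== PORT A =====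
-- len(set(liste)) == 1
def contient_unique_elt (liste : List Int) : Bool :=
  PySem.Set.len (PySem.Set.ofList liste) == 1

-- the inner for-loop of calculer_diff building `differences`
def calculer_diff_row (last : List Int) : List Int :=
  (PySem.List.pyRange 1 (last.length : Int) 1).foldl
    (fun differences i =>
      differences ++ [PySem.List.pyGetD last i 0 - PySem.List.pyGetD last (i - 1) 0]) []

-- the while-loop of calculer_diff; the fuel only makes the recursion total: on the
-- admitted inputs (last row nonempty) the last row's length strictly decreases each
-- turn and a length-1 row stops the loop, so fuel = liste[-1].length is never exhausted
def calculer_diff_loop : Nat → List (List Int) → List (List Int)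
  | 0, liste => liste
  | fuel + 1, liste =>
    if contient_unique_elt (liste.getLastD []) then liste
    else calculer_diff_loop fuel (liste ++ [calculer_diff_row (liste.getLastD [])])

def calculer_diff (liste : List (List Int)) : List (List Int) :=
  calculer_diff_loop (liste.getLastD []).length liste

-- the while-loop of trouver_precedent: fuel k+1 performs the iteration i = k
def trouver_precedent_loop : List (List Int) → Nat → List (List Int)
  | seq, 0 => seq
  | seq, k + 1 =>
    trouver_precedent_loop
      (PySem.List.pySetD seq (k : Int)
        ([PySem.List.pyGetD (PySem.List.pyGetD seq (k : Int) []) 0 0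
            - PySem.List.pyGetD (PySem.List.pyGetD seq ((k : Int) + 1) []) 0 0]
          ++ PySem.List.pyGetD seq (k : Int) [])) k

def trouver_precedent (sequence : List (List Int)) : List (List Int) :=
  let sequence := calculer_diff sequence
  let n := sequence.length
  trouver_precedent_loop sequence (n - 1)

-- ===== PORT B =====
-- [b - a for a, b in zip(row, row[1:])]
def pv_diffs (row : List Int) : List Int :=
  List.zipWith (fun a b => b - a) row (row.drop 1)

-- expand(row); the fuel only makes the recursion total: each recursive call shortens
-- the row by one and a length-1 row is constant, so fuel = row.length is never exhausted
def pv_expand : Nat → List Int → List (List Int)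
  | 0, row => [row]
  | f + 1, row =>
    if PySem.Set.len (PySem.Set.ofList row) == 1 then [row]
    else row :: pv_expand f (pv_diffs row)

-- backfill(rows); rows[0][0] / sub[0][0] ported with getD (in range on admitted inputs)
def pv_backfill : List (List Int) → List (List Int)
  | [] => []
  | [r] => [r]
  | r :: rest =>
    let sub := pv_backfill rest
    ([r.getD 0 0 - (sub.getD 0 []).getD 0 0] ++ r) :: sub

def trouver_precedent_alt (sequence : List (List Int)) : List (List Int) :=
  let last := sequence.getLastD []
  pv_backfill (sequence.dropLast ++ pv_expand last.length last)

-- ===== PRECONDITION & SPEC =====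
-- Pre_ excludes exactly the inputs on which A never returns: the empty list (IndexError
-- on liste[-1]) and lists containing an empty row (an empty last row makes calculer_diff
-- loop forever; an empty earlier row raises IndexError on sequence[i][0]).
def Pre_trouver_precedent (sequence : List (List Int)) : Prop :=
  sequence ≠ [] ∧ ∀ r ∈ sequence, r ≠ []
instance (sequence : List (List Int)) : Decidable (Pre_trouver_precedent sequence) := by
  unfold Pre_trouver_precedent; infer_instance

def pvWitness_trouver_precedent : List (List Int) := [[1, 3, 6, 10]]

def Spec_trouver_precedent (sequence : List (List Int)) (out : List (List Int)) : Prop := out = trouver_precedent_alt sequence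
instance (sequence : List (List Int)) (out : List (List Int)) : Decidable (Spec_trouver_precedent sequence out) := by unfold Spec_trouver_precedent; infer_instance

-- ===== CLAIM (what is proved, stated in full; the proofs are below) =====
def Claim_equal_trouver_precedent : Prop := ∀ (sequence : List (List Int)), Dom_trouver_precedent sequence → Pre_trouver_precedent sequence → Spec_trouver_precedent sequence (trouver_precedent sequence)

-- ===== LEMMAS AND PROOFS =====

-- A's index-by-index difference loop computes B's zipWith of consecutive differences
theorem calculer_diff_row_eq (row : List Int) : calculer_diff_row row = pv_diffs row := by
  unfold calculer_diff_row pv_diffs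
  rw [PySem.List.foldl_append_singleton_eq_map]
  apply List.ext_getElem
  · simp [PySem.List.length_pyRange_one]
  · intro k h1 h2
    simp only [List.nil_append, List.getElem_map, PySem.List.getElem_pyRange_one,
      List.getElem_zipWith, List.getElem_drop]
    have hk : k < row.length - 1 := by
      simpa [PySem.List.length_pyRange_one] using h1
    have e1 : (1 : Int) + k = ((k + 1 : Nat) : Int) := by push_cast; ring
    have e2 : ((k + 1 : Nat) : Int) - 1 = ((k : Nat) : Int) := by push_cast; ring
    rw [e1, e2, PySem.List.pyGetD_natCast, PySem.List.pyGetD_natCast,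
      List.getD_eq_getElem _ _ (by omega), List.getD_eq_getElem _ _ (by omega)]
    have h3 : row[1 + k]'(by omega) = row[k + 1]'(by omega) := getElem_congr_idx (Nat.add_comm 1 k)
    rw [h3]

theorem calculer_diff_loop_eq (f : Nat) :
    ∀ l : List (List Int), l ≠ [] →
      calculer_diff_loop f l = l.dropLast ++ pv_expand f (l.getLastD []) := by
  induction f with
  | zero =>
    intro l hl
    rcases l.eq_nil_or_concat with rfl | ⟨ys, x, rfl⟩
    · exact absurd rfl hl
    · simp [calculer_diff_loop, pv_expand]
  | succ f ih =>
    intro l hl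
    rcases l.eq_nil_or_concat with rfl | ⟨ys, x, rfl⟩
    · exact absurd rfl hl
    · by_cases h : contient_unique_elt x
      · have h2 : (PySem.Set.ofList x).length = 1 := by
          simpa [contient_unique_elt, PySem.Set.len] using h
        simp [calculer_diff_loop, pv_expand, h, h2]
      · have h2 : ¬ (PySem.Set.ofList x).length = 1 := by
          simpa [contient_unique_elt, PySem.Set.len] using h
        simp only [calculer_diff_loop, List.getLastD_concat]
        rw [if_neg (by simpa using h), ih _ (by simp)]
        simp [pv_expand, h2, calculer_diff_row_eq]

theorem loop_succ (seq : List (List Int)) (k : Nat) :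
    trouver_precedent_loop seq (k + 1) =
      trouver_precedent_loop
        (PySem.List.pySetD seq (k : Int)
          ([PySem.List.pyGetD (PySem.List.pyGetD seq (k : Int) []) 0 0
              - PySem.List.pyGetD (PySem.List.pyGetD seq ((k : Int) + 1) []) 0 0]
            ++ PySem.List.pyGetD seq (k : Int) [])) k := rfl

theorem trouver_precedent_loop_cons (k : Nat) :
    ∀ (r : List Int) (s : List (List Int)),
      trouver_precedent_loop (r :: s) (k + 1) =
        ([r.getD 0 0 - ((trouver_precedent_loop s k).getD 0 []).getD 0 0] ++ r)
          :: trouver_precedent_loop s k := by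
  induction k with
  | zero =>
    intro r s
    rw [loop_succ, show ((0 : Nat) : Int) + 1 = ((1 : Nat) : Int) by norm_num]
    simp only [PySem.List.pySetD_natCast, PySem.List.pyGetD_natCast, PySem.List.pyGetD_zero]
    simp [trouver_precedent_loop]
  | succ k ih =>
    intro r s
    rw [loop_succ]
    rw [show (((k + 1 : Nat) : Int)) + 1 = ((k + 2 : Nat) : Int) by push_cast; ring]
    simp only [PySem.List.pySetD_natCast, PySem.List.pyGetD_natCast, PySem.List.pyGetD_zero,
      List.getD_cons_succ, List.set_cons_succ]
    rw [ih, loop_succ s k,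
      show ((k : Nat) : Int) + 1 = ((k + 1 : Nat) : Int) by push_cast; ring]
    simp only [PySem.List.pySetD_natCast, PySem.List.pyGetD_natCast, PySem.List.pyGetD_zero]

theorem trouver_precedent_loop_eq (rows : List (List Int)) :
    trouver_precedent_loop rows (rows.length - 1) = pv_backfill rows := by
  induction rows with
  | nil => rfl
  | cons r rest ih =>
    cases rest with
    | nil => rfl
    | cons x t =>
      have h : (r :: x :: t).length - 1 = ((x :: t).length - 1) + 1 := by simp
      rw [h, trouver_precedent_loop_cons, ih]
      simp [pv_backfill]

-- ===== VERDICT (by name: the statement is the Claim_ definition above) =====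
theorem trouver_precedent_spec : Claim_equal_trouver_precedent := by
  intro seq _ hpre
  unfold Spec_trouver_precedent trouver_precedent trouver_precedent_alt calculer_diff
  rw [calculer_diff_loop_eq _ _ hpre.1, trouver_precedent_loop_eq]
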